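-- pv_equiv track=rewrite | github.com/tejasvi541/Nebula-Forge | nebula_forge/screens/blueprint.py | _colorize_md
-- ===== SOURCE A (Python) =====
-- def _colorize_md(text: str) -> str:
--     """Apply simple color markup for markdown display."""
--     lines = text.split("\n")
--     result = []
--     in_frontmatter = False
--     for i, line in enumerate(lines):
--         if i == 0 and line == "---":
--             in_frontmatter = True
--             result.append(f"[#565f89]{line}[/]")
--         elif in_frontmatter and line == "---":
--             in_frontmatter = False
--             result.append(f"[#565f89]{line}[/]")
--         elif in_frontmatter:
--             if ":" in line:
--                 k, _, v = line.partition(":")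
--                 result.append(f"[#bb9af7]{k}:[/][#c0caf5]{v}[/]")
--             else:
--                 result.append(f"[#565f89]{line}[/]")
--         elif line.startswith("# "):
--             result.append(f"[bold #7dcfff]{line}[/]")
--         elif line.startswith("## "):
--             result.append(f"[bold #7aa2f7]{line}[/]")
--         elif line.startswith("### "):
--             result.append(f"[#bb9af7]{line}[/]")
--         elif line.startswith("- [ ]"):
--             result.append(f"[#565f89]{line}[/]")
--         elif line.startswith("> "):
--             result.append(f"[#e0af68]{line}[/]")
--         elif line.startswith("```"):
--             result.append(f"[#3b4261]{line}[/]")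
--         else:
--             result.append(f"[#c0caf5]{line}[/]")
--     return "\n".join(result)
-- ===== SOURCE B (Python) =====
-- _RULES = [
--     ("# ", "[bold #7dcfff]{}[/]"),
--     ("## ", "[bold #7aa2f7]{}[/]"),
--     ("### ", "[#bb9af7]{}[/]"),
--     ("- [ ]", "[#565f89]{}[/]"),
--     ("> ", "[#e0af68]{}[/]"),
--     ("```", "[#3b4261]{}[/]"),
-- ]
--
--
-- def _colorize_md(text: str) -> str:
--     """Apply simple color markup for markdown display (table-driven rules)."""
--     lines = text.split("\n")
--     out = []
--     i = 0
--     if lines and lines[0] == "---":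
--         out.append("[#565f89]---[/]")
--         i = 1
--         while i < len(lines) and lines[i] != "---":
--             line = lines[i]
--             if ":" in line:
--                 k, _, v = line.partition(":")
--                 out.append(f"[#bb9af7]{k}:[/][#c0caf5]{v}[/]")
--             else:
--                 out.append(f"[#565f89]{line}[/]")
--             i += 1
--         if i < len(lines):
--             out.append("[#565f89]---[/]")
--             i += 1
--     for line in lines[i:]:
--         for prefix, fmt in _RULES:
--             if line.startswith(prefix):
--                 out.append(fmt.format(line))
--                 break
--         else:
--             out.append(f"[#c0caf5]{line}[/]")
--     return "\n".join(out)
-- ===== Notes on version B (the rewrite author's own statement) =====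
-- stated objective: idiomatic
-- what changed: A's single indexed loop with an in_frontmatter flag and an elif chain is replaced by two phases: an explicit frontmatter prefix consumer, then a table of (prefix, template) rules mapped over the remaining lines.
import Mathlib
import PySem

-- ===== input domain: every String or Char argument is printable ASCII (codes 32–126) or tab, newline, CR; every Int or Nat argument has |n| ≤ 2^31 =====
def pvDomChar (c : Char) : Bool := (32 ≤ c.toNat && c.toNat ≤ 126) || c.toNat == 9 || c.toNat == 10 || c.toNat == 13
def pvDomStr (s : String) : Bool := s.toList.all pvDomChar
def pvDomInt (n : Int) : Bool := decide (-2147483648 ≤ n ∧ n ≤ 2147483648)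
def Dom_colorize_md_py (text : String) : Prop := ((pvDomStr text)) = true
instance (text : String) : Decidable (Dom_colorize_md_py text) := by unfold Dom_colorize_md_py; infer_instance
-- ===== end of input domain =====

-- B replaces A's single indexed loop + flag + elif chain by a frontmatter prefix phase and a
-- (prefix, color)-rule table mapped over the rest (idiomatic; same cost).

-- ===== PORT A =====
-- f"[{color}]{line}[/]"
def pvTag (o : List Char) (line : List Char) : List Char := o ++ line ++ "[/]".toList

-- line.partition(":") formatting; exact where ':' occurs in line (the only place A uses it)
def pvKV (line : List Char) : List Char :=
  let k := line.takeWhile (· ≠ ':')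
  let v := (line.dropWhile (· ≠ ':')).tail
  "[#bb9af7]".toList ++ k ++ ":[/][#c0caf5]".toList ++ v ++ "[/]".toList

def pvStepA (st : List (List Char) × Bool) (p : Int × List Char) : List (List Char) × Bool :=
  match st, p with
  | (result, inFm), (i, line) =>
    if i = 0 ∧ line = "---".toList then
      (result ++ [pvTag "[#565f89]".toList line], true)
    else if inFm ∧ line = "---".toList then
      (result ++ [pvTag "[#565f89]".toList line], false)
    else if inFm then
      if PySem.Chars.isIn [':'] line then (result ++ [pvKV line], inFm)
      else (result ++ [pvTag "[#565f89]".toList line], inFm)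
    else if PySem.Chars.startswith line "# ".toList then (result ++ [pvTag "[bold #7dcfff]".toList line], inFm)
    else if PySem.Chars.startswith line "## ".toList then (result ++ [pvTag "[bold #7aa2f7]".toList line], inFm)
    else if PySem.Chars.startswith line "### ".toList then (result ++ [pvTag "[#bb9af7]".toList line], inFm)
    else if PySem.Chars.startswith line "- [ ]".toList then (result ++ [pvTag "[#565f89]".toList line], inFm)
    else if PySem.Chars.startswith line "> ".toList then (result ++ [pvTag "[#e0af68]".toList line], inFm)
    else if PySem.Chars.startswith line "```".toList then (result ++ [pvTag "[#3b4261]".toList line], inFm)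
    else (result ++ [pvTag "[#c0caf5]".toList line], inFm)

def colorize_md_py (text : String) : String :=
  String.ofList (PySem.Chars.join ['\n']
    (((PySem.List.enumerate (PySem.Chars.splitOn text.toList ['\n']) 0).foldl pvStepA ([], false)).1))

-- ===== PORT B =====
def pvRules : List (List Char × List Char) :=
  [("# ".toList, "[bold #7dcfff]".toList),
   ("## ".toList, "[bold #7aa2f7]".toList),
   ("### ".toList, "[#bb9af7]".toList),
   ("- [ ]".toList, "[#565f89]".toList),
   ("> ".toList, "[#e0af68]".toList),
   ("```".toList, "[#3b4261]".toList)]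

-- first matching (prefix, color) rule, else the default color
def pvApplyRules : List (List Char × List Char) → List Char → List Char
  | [], line => pvTag "[#c0caf5]".toList line
  | (p, o) :: rest, line =>
      if PySem.Chars.startswith line p then pvTag o line else pvApplyRules rest line

-- Source B's while loop over the frontmatter body: (colored body incl. closing ---, remaining lines)
def pvFmBody : List (List Char) → List (List Char) × List (List Char)
  | [] => ([], [])
  | l :: ls =>
      if l = "---".toList then ([pvTag "[#565f89]".toList l], ls)
      else
        match pvFmBody ls with
        | (body, rest) =>
          ((if PySem.Chars.isIn [':'] l then pvKV l else pvTag "[#565f89]".toList l) :: body, rest)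

def pvColorLines (lines : List (List Char)) : List (List Char) :=
  match lines with
  | [] => []
  | l :: ls =>
      if l = "---".toList then
        match pvFmBody ls with
        | (body, rest) => pvTag "[#565f89]".toList l :: body ++ rest.map (pvApplyRules pvRules)
      else (l :: ls).map (pvApplyRules pvRules)

def colorize_md_py_alt (text : String) : String :=
  String.ofList (PySem.Chars.join ['\n'] (pvColorLines (PySem.Chars.splitOn text.toList ['\n'])))

-- ===== PRECONDITION & SPEC =====
def Spec_colorize_md_py (text : String) (out : String) : Prop := out = colorize_md_py_alt text
instance (text : String) (out : String) : Decidable (Spec_colorize_md_py text out) := by unfold Spec_colorize_md_py; infer_instance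

-- ===== CLAIM (what is proved, stated in full; the proofs are below) =====
def Claim_equal_colorize_md_py : Prop := ∀ (text : String), Dom_colorize_md_py text → Spec_colorize_md_py text (colorize_md_py text)

-- ===== LEMMAS AND PROOFS =====

theorem pvStepA_nofm (acc : List (List Char)) (i : Int) (line : List Char)
    (hi : ¬(i = 0 ∧ line = "---".toList)) :
    pvStepA (acc, false) (i, line) = (acc ++ [pvApplyRules pvRules line], false) := by
  have h2 : ¬((false : Bool) = true ∧ line = "---".toList) := by simp
  have h3 : ¬((false : Bool) = true) := by simp
  simp only [pvStepA, if_neg hi, if_neg h2, if_neg h3, pvApplyRules, pvRules]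
  split_ifs <;> rfl

theorem pv_foldl_nofm (ls : List (List Char)) (s : Int) (acc : List (List Char)) (hs : 1 ≤ s) :
    (PySem.List.enumerate ls s).foldl pvStepA (acc, false)
      = (acc ++ ls.map (pvApplyRules pvRules), false) := by
  induction ls generalizing s acc with
  | nil => simp [PySem.List.enumerate_nil]
  | cons l ls ih =>
      rw [PySem.List.enumerate_cons, List.foldl_cons,
        pvStepA_nofm acc s l (by rintro ⟨h, -⟩; omega),
        ih (s + 1) _ (by omega)]
      simp

theorem pv_foldl_fm (ls : List (List Char)) (s : Int) (acc : List (List Char)) (hs : 1 ≤ s) :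
    ((PySem.List.enumerate ls s).foldl pvStepA (acc, true)).1
      = acc ++ (pvFmBody ls).1 ++ ((pvFmBody ls).2).map (pvApplyRules pvRules) := by
  induction ls generalizing s acc with
  | nil => simp [PySem.List.enumerate_nil, pvFmBody]
  | cons l ls ih =>
      rw [PySem.List.enumerate_cons, List.foldl_cons]
      have h1 : ¬(s = 0 ∧ l = "---".toList) := by rintro ⟨h, -⟩; omega
      by_cases hl : l = "---".toList
      · have e : pvStepA (acc, true) (s, l) = (acc ++ [pvTag "[#565f89]".toList l], false) := by
          simp only [pvStepA, if_neg h1]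
          rw [if_pos ⟨by trivial, hl⟩]
        rw [e, pv_foldl_nofm ls (s + 1) _ (by omega)]
        simp [pvFmBody, hl]
      · have e : pvStepA (acc, true) (s, l)
            = (acc ++ [if PySem.Chars.isIn [':'] l then pvKV l else pvTag "[#565f89]".toList l], true) := by
          simp only [pvStepA, if_neg h1]
          rw [if_neg (fun h => hl h.2), if_pos (by trivial)]
          split_ifs <;> rfl
        rw [e, ih (s + 1) _ (by omega)]
        simp only [pvFmBody, if_neg hl]
        by_cases hc : PySem.Chars.isIn [':'] l = true <;> simp [hc]

theorem pv_lines_eq (lines : List (List Char)) :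
    ((PySem.List.enumerate lines 0).foldl pvStepA ([], false)).1 = pvColorLines lines := by
  cases lines with
  | nil => simp [PySem.List.enumerate_nil, pvColorLines]
  | cons l ls =>
      rw [PySem.List.enumerate_cons, List.foldl_cons]
      by_cases hl : l = "---".toList
      · have e : pvStepA ([], false) (0, l) = ([pvTag "[#565f89]".toList l], true) := by
          simp only [pvStepA]
          rw [if_pos ⟨by trivial, hl⟩]
          simp
        rw [e, pv_foldl_fm ls (0 + 1) _ (by omega)]
        simp only [pvColorLines, if_pos hl]
        cases hb : pvFmBody ls with
        | mk body rest => simp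
      · rw [pvStepA_nofm [] 0 l (by rintro ⟨-, h⟩; exact hl h),
          pv_foldl_nofm ls (0 + 1) _ (by omega)]
        have hl' : ¬ l = ['-', '-', '-'] := by simpa using hl
        simp [pvColorLines, hl']

-- ===== VERDICT (by name: the statement is the Claim_ definition above) =====
theorem colorize_md_py_spec : Claim_equal_colorize_md_py := by
  intro text _
  unfold Spec_colorize_md_py colorize_md_py colorize_md_py_alt
  rw [pv_lines_eq]
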